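-- pv_equiv track=rewrite | github.com/absognety/Competitive-Coding-Platforms | Hackerearth/June_Easy_2019/medianGame.py | medianGame
-- ===== SOURCE A (Python) =====
-- def medianGame(arr,N):
--     C=1
--     while (C<=(N-2)):
--         sublists = []
--         for i in range(len(arr)+1):
--             for j in range(i+1,len(arr)+1):
--                 sub = arr[i:j]
--                 if len(sub) > 2 and len(sub)%2!=0:
--                     sublists.append(sub)
--         sublists = [list(x) for x in set(tuple(x) for x in sublists)]
--         medians = [sorted(x)[(len(x)-1)//2] for x in sublists]
--         min_md = min(medians)
--         arr.remove(min_md)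
--         C += 1
--     return (sum(arr))
-- ===== SOURCE B (Python) =====
-- def medianGame(arr, N):
--     # Only length-3 windows need scanning: some 3-window's median is always
--     # <= any longer odd window's median, so the round minimum is the same.
--     # Works on a copy; A mutates arr in place (return value is identical).
--     xs = list(arr)
--     for _ in range(N - 2):
--         best = min(x + y + z - min(x, y, z) - max(x, y, z)
--                    for x, y, z in zip(xs, xs[1:], xs[2:]))
--         xs.remove(best)
--     return sum(xs)
-- ===== Notes on version B (the rewrite author's own statement) =====
-- stated objective: faster
-- what changed: Each round scans only the length-3 windows (a 3-window median always attains the minimum over all odd windows) with an O(1) arithmetic triple-median, instead of enumerating, deduplicating and sorting every odd sublist.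
import Mathlib
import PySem

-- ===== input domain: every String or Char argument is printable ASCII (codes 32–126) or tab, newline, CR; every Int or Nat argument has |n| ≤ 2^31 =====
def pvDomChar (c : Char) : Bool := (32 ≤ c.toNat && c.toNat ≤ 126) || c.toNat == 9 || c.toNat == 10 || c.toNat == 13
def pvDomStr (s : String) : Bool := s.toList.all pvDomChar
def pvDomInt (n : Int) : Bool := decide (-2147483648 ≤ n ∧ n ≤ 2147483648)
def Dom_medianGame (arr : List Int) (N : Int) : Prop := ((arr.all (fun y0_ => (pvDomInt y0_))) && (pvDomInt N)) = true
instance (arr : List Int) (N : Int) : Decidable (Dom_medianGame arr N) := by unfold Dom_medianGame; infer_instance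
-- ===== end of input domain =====

-- B scans only length-3 windows with an O(1) triple median (a 3-window median always attains
-- the round minimum over all odd windows); equivalence is about the RETURN value only
-- (Python A mutates arr in place, B works on a copy; the ports are pure).

-- ===== PORT A =====
-- sorted(x)[(len(x)-1)//2]
def aMedian (w : List Int) : Int :=
  PySem.List.pyGetD (PySem.List.sorted w (fun v => v) false)
    (PySem.Int.floordiv ((w.length : Int) - 1) 2) 0

-- the two nested for-loops collecting odd sublists of length > 2
def aSublists (xs : List Int) : List (List Int) :=
  (PySem.List.pyRange 0 ((xs.length : Int) + 1) 1).foldl (fun acc i =>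
    (PySem.List.pyRange (i + 1) ((xs.length : Int) + 1) 1).foldl (fun acc2 j =>
      let sub := PySem.List.slice xs (some i) (some j)
      if 2 < sub.length ∧ sub.length % 2 ≠ 0 then acc2 ++ [sub] else acc2) acc) []

-- one iteration of the while loop; none = Python raises (min of an empty sequence)
def aRound (xs : List Int) : Option (List Int) :=
  let dedup := PySem.Set.ofList (aSublists xs)
  let medians := dedup.map aMedian
  match PySem.List.min? medians (fun v => v) with
  | none => none
  | some m => PySem.List.remove? xs m

def aLoop (xs : List Int) : Nat → List Int
  | 0 => xs
  | fuel + 1 =>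
    match aRound xs with
    | none => xs
    | some ys => aLoop ys fuel

def medianGame (arr : List Int) (N : Int) : Int :=
  (aLoop arr (N - 2).toNat).sum

-- ===== PORT B =====
-- x + y + z - min(x,y,z) - max(x,y,z)
def med3 (x y z : Int) : Int := x + y + z - min x (min y z) - max x (max y z)

-- [med3(x,y,z) for x,y,z in zip(xs, xs[1:], xs[2:])]
def bMeds (xs : List Int) : List Int :=
  (xs.zip ((PySem.List.slice xs (some 1) none).zip (PySem.List.slice xs (some 2) none))).map
    (fun t => med3 t.1 t.2.1 t.2.2)

def bRound (xs : List Int) : Option (List Int) :=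
  match PySem.List.min? (bMeds xs) (fun v => v) with
  | none => none
  | some m => PySem.List.remove? xs m

def bLoop (xs : List Int) : Nat → List Int
  | 0 => xs
  | fuel + 1 =>
    match bRound xs with
    | none => xs
    | some ys => bLoop ys fuel

def medianGame_alt (arr : List Int) (N : Int) : Int :=
  (bLoop arr (N - 2).toNat).sum

-- ===== PRECONDITION & SPEC =====
-- A raises ValueError (min of an empty sequence) when it must run N-2 > 0 rounds but the list
-- runs out of odd windows, i.e. when 2 < N and arr.length < N; Pre_ excludes exactly that.
def Pre_medianGame (arr : List Int) (N : Int) : Prop := N ≤ 2 ∨ N ≤ (arr.length : Int)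
instance (arr : List Int) (N : Int) : Decidable (Pre_medianGame arr N) := by unfold Pre_medianGame; infer_instance
def pvWitness_medianGame : List Int × Int := ([1, 2, 3], 3)

def Spec_medianGame (arr : List Int) (N : Int) (out : Int) : Prop := out = medianGame_alt arr N
instance (arr : List Int) (N : Int) (out : Int) : Decidable (Spec_medianGame arr N out) := by unfold Spec_medianGame; infer_instance

-- ===== CLAIM (what is proved, stated in full; the proofs are below) =====
def Claim_equal_medianGame : Prop := ∀ (arr : List Int) (N : Int), Dom_medianGame arr N → Pre_medianGame arr N → Spec_medianGame arr N (medianGame arr N)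

-- ===== LEMMAS AND PROOFS =====

-- no two elements ≤ m sit within distance 2 of each other
def Spread (l : List Int) (m : Int) : Prop :=
  ∀ p q x y, p < q → q ≤ p + 2 → l[p]? = some x → l[q]? = some y → x ≤ m → y ≤ m → False

-- med3 is the middle value: bounds and membership
theorem med3_le_12 {x y z m : Int} (hx : x ≤ m) (hy : y ≤ m) : med3 x y z ≤ m := by
  simp only [med3, min_def, max_def]; split_ifs <;> omega

theorem med3_le_13 {x y z m : Int} (hx : x ≤ m) (hz : z ≤ m) : med3 x y z ≤ m := by
  simp only [med3, min_def, max_def]; split_ifs <;> omega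

theorem med3_le_23 {x y z m : Int} (hy : y ≤ m) (hz : z ≤ m) : med3 x y z ≤ m := by
  simp only [med3, min_def, max_def]; split_ifs <;> omega

theorem med3_mem (x y z : Int) : med3 x y z = x ∨ med3 x y z = y ∨ med3 x y z = z := by
  simp only [med3, min_def, max_def]; split_ifs <;> omega

theorem getElem_idx_congr {xs : List Int} {i j : Nat} (h : i = j) (hi : i < xs.length) :
    xs[i]'hi = xs[j]'(h ▸ hi) := by subst h; rfl

theorem pairwise3 {a b c : Int} (h1 : a ≤ b) (h2 : a ≤ c) (h3 : b ≤ c) :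
    List.Pairwise (fun x1 x2 => x1 ≤ x2) [a, b, c] := by
  refine List.Pairwise.cons ?_ (List.Pairwise.cons ?_ (List.Pairwise.cons ?_ List.Pairwise.nil))
  · intro v hv
    simp only [List.mem_cons, List.not_mem_nil, or_false] at hv
    rcases hv with rfl | rfl
    · exact h1
    · exact h2
  · intro v hv
    simp only [List.mem_cons, List.not_mem_nil, or_false] at hv
    rcases hv with rfl
    exact h3
  · intro v hv
    simp at hv

theorem pyGetD3 (a b c : Int) : PySem.List.pyGetD [a, b, c] 1 0 = b := by
  rw [PySem.List.pyGetD_eq_getElem _ 0 (by norm_num) (by norm_num)]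
  norm_num

-- the A-side median of a 3-element list is med3
theorem aMedian_triple (x y z : Int) : aMedian [x, y, z] = med3 x y z := by
  unfold aMedian
  have h32 : ((([x, y, z] : List Int).length : Int) - 1) = 2 := by simp
  rw [h32, show PySem.Int.floordiv 2 2 = 1 from by decide]
  rcases le_total x y with h1 | h1 <;> rcases le_total y z with h2 | h2 <;>
    rcases le_total x z with h3 | h3
  · rw [PySem.List.sorted_id_eq_of_perm_of_pairwise [x, y, z] [x, y, z] (List.Perm.refl _)
      (pairwise3 h1 h3 h2), pyGetD3]
    simp only [med3, min_def, max_def]; split_ifs <;> omega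
  · rw [PySem.List.sorted_id_eq_of_perm_of_pairwise [x, y, z] [x, y, z] (List.Perm.refl _)
      (pairwise3 h1 (by omega) h2), pyGetD3]
    simp only [med3, min_def, max_def]; split_ifs <;> omega
  · rw [PySem.List.sorted_id_eq_of_perm_of_pairwise [x, y, z] [x, z, y]
      ((List.Perm.swap y z []).cons x) (pairwise3 h3 h1 h2), pyGetD3]
    simp only [med3, min_def, max_def]; split_ifs <;> omega
  · rw [PySem.List.sorted_id_eq_of_perm_of_pairwise [x, y, z] [z, x, y]
      ((List.Perm.swap x z [y]).trans ((List.Perm.swap y z []).cons x))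
      (pairwise3 h3 h2 h1), pyGetD3]
    simp only [med3, min_def, max_def]; split_ifs <;> omega
  · rw [PySem.List.sorted_id_eq_of_perm_of_pairwise [x, y, z] [y, x, z]
      (List.Perm.swap x y [z]) (pairwise3 h1 h2 h3), pyGetD3]
    simp only [med3, min_def, max_def]; split_ifs <;> omega
  · rw [PySem.List.sorted_id_eq_of_perm_of_pairwise [x, y, z] [y, z, x]
      (((List.Perm.swap x z []).cons y).trans (List.Perm.swap x y [z]))
      (pairwise3 h2 h1 h3), pyGetD3]
    simp only [med3, min_def, max_def]; split_ifs <;> omega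
  · rw [PySem.List.sorted_id_eq_of_perm_of_pairwise [x, y, z] [z, y, x]
      ((List.Perm.swap y z [x]).trans (((List.Perm.swap x z []).cons y).trans
        (List.Perm.swap x y [z]))) (pairwise3 h2 (by omega) h1), pyGetD3]
    simp only [med3, min_def, max_def]; split_ifs <;> omega
  · rw [PySem.List.sorted_id_eq_of_perm_of_pairwise [x, y, z] [z, y, x]
      ((List.Perm.swap y z [x]).trans (((List.Perm.swap x z []).cons y).trans
        (List.Perm.swap x y [z]))) (pairwise3 h2 h3 h1), pyGetD3]
    simp only [med3, min_def, max_def]; split_ifs <;> omega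

-- the nested collecting loops, as a flatMap
theorem aSublists_eq (xs : List Int) :
    aSublists xs = (PySem.List.pyRange 0 ((xs.length : Int) + 1) 1).flatMap (fun i =>
      ((PySem.List.pyRange (i + 1) ((xs.length : Int) + 1) 1).filter (fun j =>
        decide (2 < (PySem.List.slice xs (some i) (some j)).length ∧
          (PySem.List.slice xs (some i) (some j)).length % 2 ≠ 0))).map
        (fun j => PySem.List.slice xs (some i) (some j))) := by
  unfold aSublists
  have hin : ∀ (acc : List (List Int)) (i : Int),
      (PySem.List.pyRange (i + 1) ((xs.length : Int) + 1) 1).foldl (fun acc2 j =>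
        let sub := PySem.List.slice xs (some i) (some j)
        if 2 < sub.length ∧ sub.length % 2 ≠ 0 then acc2 ++ [sub] else acc2) acc =
      acc ++ ((PySem.List.pyRange (i + 1) ((xs.length : Int) + 1) 1).filter (fun j =>
        decide (2 < (PySem.List.slice xs (some i) (some j)).length ∧
          (PySem.List.slice xs (some i) (some j)).length % 2 ≠ 0))).map
        (fun j => PySem.List.slice xs (some i) (some j)) := by
    intro acc i
    exact PySem.List.foldl_append_ite
      (fun j => 2 < (PySem.List.slice xs (some i) (some j)).length ∧
        (PySem.List.slice xs (some i) (some j)).length % 2 ≠ 0)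
      (fun j => PySem.List.slice xs (some i) (some j)) _ _
  simp only [hin]
  rw [PySem.List.foldl_append_eq_flatMap]
  simp

theorem mem_aSublists {xs w : List Int} :
    w ∈ aSublists xs ↔ ∃ i j : Int, 0 ≤ i ∧ i < j ∧ j ≤ (xs.length : Int) ∧
      w = PySem.List.slice xs (some i) (some j) ∧ 2 < w.length ∧ w.length % 2 ≠ 0 := by
  rw [aSublists_eq]
  simp only [List.mem_flatMap, List.mem_map, List.mem_filter, PySem.List.mem_pyRange_one,
    decide_eq_true_eq]
  constructor
  · rintro ⟨i, ⟨h0, _⟩, j, ⟨⟨hij, hjL⟩, hc1, hc2⟩, rfl⟩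
    exact ⟨i, j, h0, by omega, by omega, rfl, hc1, hc2⟩
  · rintro ⟨i, j, h0, hij, hjL, rfl, hc1, hc2⟩
    exact ⟨i, ⟨h0, by omega⟩, j, ⟨⟨by omega, by omega⟩, hc1, hc2⟩, rfl⟩

theorem bMeds_eq (xs : List Int) :
    bMeds xs = (xs.zip ((xs.drop 1).zip (xs.drop 2))).map
      (fun t => med3 t.1 t.2.1 t.2.2) := by
  unfold bMeds
  have hs2 : PySem.List.slice xs (some 2) none = List.drop 2 xs := by
    have h := PySem.List.slice_from xs (a := 2) (by norm_num)
    simpa using h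
  rw [PySem.List.slice_from_one, ← List.drop_one, hs2]

theorem mem_bMeds {xs : List Int} {u : Int} :
    u ∈ bMeds xs ↔ ∃ a : Nat, a + 2 < xs.length ∧
      u = med3 (xs.getD a 0) (xs.getD (a + 1) 0) (xs.getD (a + 2) 0) := by
  rw [bMeds_eq]
  constructor
  · intro hu
    obtain ⟨t, ht, rfl⟩ := List.mem_map.mp hu
    obtain ⟨a, ha, rfl⟩ := List.mem_iff_getElem.mp ht
    simp only [List.length_zip, List.length_drop] at ha
    have haL : a + 2 < xs.length := by omega
    refine ⟨a, haL, ?_⟩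
    rw [List.getElem_zip, List.getElem_zip, List.getElem_drop, List.getElem_drop]
    rw [getElem_idx_congr (by omega : 1 + a = a + 1), getElem_idx_congr (by omega : 2 + a = a + 2)]
    rw [List.getD_eq_getElem _ _ (by omega : a < xs.length),
      List.getD_eq_getElem _ _ (by omega : a + 1 < xs.length),
      List.getD_eq_getElem _ _ (by omega : a + 2 < xs.length)]
  · rintro ⟨a, ha, rfl⟩
    refine List.mem_map.mpr ⟨(xs[a]'(by omega), (xs[a+1]'(by omega), xs[a+2]'(by omega))), ?_, ?_⟩
    · refine List.mem_iff_getElem.mpr ⟨a, ?_, ?_⟩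
      · simp only [List.length_zip, List.length_drop]; omega
      · rw [List.getElem_zip, List.getElem_zip, List.getElem_drop, List.getElem_drop]
        rw [getElem_idx_congr (by omega : 1 + a = a + 1),
          getElem_idx_congr (by omega : 2 + a = a + 2)]
    · rw [List.getD_eq_getElem _ _ (by omega : a < xs.length),
        List.getD_eq_getElem _ _ (by omega : a + 1 < xs.length),
        List.getD_eq_getElem _ _ (by omega : a + 2 < xs.length)]

theorem spread_count_aux : ∀ (n : Nat) (l : List Int), l.length ≤ n → ∀ m : Int,
    Spread l m → l.countP (fun v => decide (v ≤ m)) ≤ (l.length + 2) / 3 := by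
  intro n
  induction n with
  | zero =>
    intro l hl m _
    rcases l with _ | ⟨a, t⟩
    · simp
    · simp at hl
  | succ n ih =>
    intro l hl m h
    match l with
    | [] => simp
    | a :: t =>
      have ht : Spread t m := by
        intro p q x y hpq hq2 hx hy hxm hym
        exact h (p + 1) (q + 1) x y (by omega) (by omega) (by simpa using hx)
          (by simpa using hy) hxm hym
      by_cases ha : a ≤ m
      · match t, ht with
        | [], _ =>
          have hc : (a :: ([] : List Int)).countP (fun v => decide (v ≤ m)) = 1 := by
            simp [List.countP_cons, ha]
          rw [hc]; simp
        | [b], _ =>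
          have hb : ¬ b ≤ m := fun hbm => h 0 1 a b (by omega) (by omega) rfl rfl ha hbm
          have hc : (a :: [b]).countP (fun v => decide (v ≤ m)) = 1 := by
            simp [List.countP_cons, ha, hb]
          rw [hc]; simp
        | b :: c :: r, htr =>
          have hb : ¬ b ≤ m := fun hbm => h 0 1 a b (by omega) (by omega) rfl rfl ha hbm
          have hc : ¬ c ≤ m := fun hcm => h 0 2 a c (by omega) (by omega) rfl rfl ha hcm
          have hr : Spread r m := by
            intro p q x y hpq hq2 hx hy hxm hym
            exact htr (p + 2) (q + 2) x y (by omega) (by omega) (by simpa using hx)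
              (by simpa using hy) hxm hym
          have hrec := ih r (by simp at hl ⊢; omega) m hr
          have hcount : (a :: b :: c :: r).countP (fun v => decide (v ≤ m)) =
              r.countP (fun v => decide (v ≤ m)) + 1 := by
            simp [List.countP_cons, ha, hb, hc]
          have hlen3 : (a :: b :: c :: r).length = r.length + 3 := by simp
          rw [hcount, hlen3]
          omega
      · have hrec := ih t (by simp at hl; omega) m ht
        have hcount : (a :: t).countP (fun v => decide (v ≤ m)) =
            t.countP (fun v => decide (v ≤ m)) := by
          simp [List.countP_cons, ha]
        have hlen1 : (a :: t).length = t.length + 1 := by simp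
        rw [hcount, hlen1]
        omega

theorem spread_count (l : List Int) (m : Int) (h : Spread l m) :
    l.countP (fun v => decide (v ≤ m)) ≤ (l.length + 2) / 3 :=
  spread_count_aux l.length l le_rfl m h

-- the median has (len-1)/2 + 1 elements ≤ it
theorem countP_le_median (w : List Int) (h2 : 2 < w.length) :
    (w.length - 1) / 2 + 1 ≤ w.countP (fun v => decide (v ≤ aMedian w)) := by
  set s := PySem.List.sorted w (fun v => v) false with hs
  have hlen : s.length = w.length := PySem.List.length_sorted w (fun v => v) false
  have hperm : s.Perm w := PySem.List.sorted_perm w (fun v => v) false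
  set k := (w.length - 1) / 2 with hkdef
  have hk : k < s.length := by omega
  have hm : aMedian w = s[k] := by
    unfold aMedian
    have h1 : ((w.length : Int) - 1) = (((w.length - 1 : Nat)) : Int) := by push_cast; omega
    rw [h1, show PySem.Int.floordiv (((w.length - 1 : Nat)) : Int) 2 =
      (((w.length - 1) / 2 : Nat) : Int) from by
        exact_mod_cast PySem.Int.floordiv_natCast (w.length - 1) 2]
    rw [PySem.List.pyGetD_natCast]
    rw [← hs]
    exact List.getD_eq_getElem _ _ hk
  rw [← List.Perm.countP_eq _ hperm]
  have hsplit : s = s.take (k + 1) ++ s.drop (k + 1) := (List.take_append_drop _ _).symm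
  rw [hsplit, List.countP_append]
  have hall : (s.take (k + 1)).countP (fun v => decide (v ≤ aMedian w)) =
      (s.take (k + 1)).length := by
    rw [List.countP_eq_length]
    intro a hamem
    obtain ⟨j, hj, rfl⟩ := List.mem_iff_getElem.mp hamem
    have hjk : j ≤ k := by simp only [List.length_take] at hj; omega
    rw [List.getElem_take]
    have hmono := PySem.List.sorted_id_getElem_mono w (p := j) (q := k) hjk
      (show k < (PySem.List.sorted w (fun x => x)).length from hk)
    simp only [decide_eq_true_eq, hm]
    exact hmono
  have htlen : (s.take (k + 1)).length = k + 1 := by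
    simp only [List.length_take]; omega
  omega

-- core: some 3-window of an odd (>2) list has med3 ≤ its median
theorem exists_med3_le_median (w : List Int) (h2 : 2 < w.length) (hodd : w.length % 2 ≠ 0) :
    ∃ t : Nat, t + 2 < w.length ∧
      med3 (w.getD t 0) (w.getD (t + 1) 0) (w.getD (t + 2) 0) ≤ aMedian w := by
  by_contra hcon
  push_neg at hcon
  have hspread : Spread w (aMedian w) := by
    intro p q x y hpq hq2 hx hy hxm hym
    have hql : q < w.length := (List.getElem?_eq_some_iff.mp hy).1
    have hgx : w.getD p 0 = x := by rw [List.getD_eq_getElem?_getD, hx]; rfl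
    have hgy : w.getD q 0 = y := by rw [List.getD_eq_getElem?_getD, hy]; rfl
    rcases (by omega : q = p + 1 ∨ q = p + 2) with hq | hq
    · by_cases hp2 : p + 2 < w.length
      · have hbig := hcon p hp2
        have hle : med3 (w.getD p 0) (w.getD (p + 1) 0) (w.getD (p + 2) 0) ≤ aMedian w :=
          med3_le_12 (by rw [hgx]; exact hxm) (by rw [← hq, hgy]; exact hym)
        omega
      · have he1 : p - 1 + 1 = p := by omega
        have he2 : p - 1 + 2 = p + 1 := by omega
        have hbig := hcon (p - 1) (by omega)
        have hle : med3 (w.getD (p - 1) 0) (w.getD (p - 1 + 1) 0) (w.getD (p - 1 + 2) 0) ≤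
            aMedian w := by
          rw [he1, he2]
          exact med3_le_23 (by rw [hgx]; exact hxm) (by rw [← hq, hgy]; exact hym)
        omega
    · have hbig := hcon p (by omega)
      have hle : med3 (w.getD p 0) (w.getD (p + 1) 0) (w.getD (p + 2) 0) ≤ aMedian w :=
        med3_le_13 (by rw [hgx]; exact hxm) (by rw [← hq, hgy]; exact hym)
      omega
  have c1 := spread_count w (aMedian w) hspread
  have c2 := countP_le_median w h2
  omega

-- min? agrees on the two collections
theorem min?_congr_sub (L1 L2 : List Int) (hne : L2 ≠ [])
    (hsub : ∀ b ∈ L2, b ∈ L1) (hdom : ∀ a ∈ L1, ∃ b ∈ L2, b ≤ a) :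
    PySem.List.min? L1 (fun v => v) = PySem.List.min? L2 (fun v => v) := by
  have hne1 : L1 ≠ [] := by
    intro h1
    obtain ⟨b, hb⟩ := List.exists_mem_of_ne_nil L2 hne
    have := hsub b hb
    simp [h1] at this
  obtain ⟨m1, hm1⟩ : ∃ m1, PySem.List.min? L1 (fun v => v) = some m1 := by
    cases h : PySem.List.min? L1 (fun v => v) with
    | none => exact absurd ((PySem.List.min?_eq_none_iff _ _).mp h) hne1
    | some m => exact ⟨m, rfl⟩
  obtain ⟨m2, hm2⟩ : ∃ m2, PySem.List.min? L2 (fun v => v) = some m2 := by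
    cases h : PySem.List.min? L2 (fun v => v) with
    | none => exact absurd ((PySem.List.min?_eq_none_iff _ _).mp h) hne
    | some m => exact ⟨m, rfl⟩
  have hmem1 := PySem.List.min?_mem hm1
  have hmem2 := PySem.List.min?_mem hm2
  have hmin1 := PySem.List.min?_isMin hm1
  have hmin2 := PySem.List.min?_isMin hm2
  have h12 : m1 ≤ m2 := hmin1 m2 (hsub m2 hmem2)
  obtain ⟨b, hbmem, hb⟩ := hdom m1 hmem1
  have h21 : m2 ≤ m1 := le_trans (hmin2 b hbmem) hb
  rw [hm1, hm2, le_antisymm h12 h21]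

-- one round of A equals one round of B, and it removes exactly one element
theorem roundAB_eq (xs : List Int) (h3 : 3 ≤ xs.length) :
    aRound xs = bRound xs ∧ ∃ ys, bRound xs = some ys ∧ ys.length + 1 = xs.length := by
  have hblen : (bMeds xs).length = xs.length - 2 := by
    rw [bMeds_eq]
    simp only [List.length_map, List.length_zip, List.length_drop]
    omega
  have hbne : bMeds xs ≠ [] := by
    intro h
    rw [h] at hblen
    simp at hblen
    omega
  have hsub : ∀ b ∈ bMeds xs, b ∈ (PySem.Set.ofList (aSublists xs)).map aMedian := by
    intro b hb
    obtain ⟨a, ha, rfl⟩ := mem_bMeds.mp hb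
    have hslice : PySem.List.slice xs (some (a : Int)) (some ((a : Int) + 3)) =
        [xs.getD a 0, xs.getD (a + 1) 0, xs.getD (a + 2) 0] := by
      have h3' : ((a : Int) + 3) = (((a + 3 : Nat)) : Int) := by push_cast; ring
      rw [h3', PySem.List.slice_natCast]
      have hd3 : a + 3 - a = 3 := by omega
      rw [hd3]
      rw [List.drop_eq_getElem_cons (by omega : a < xs.length)]
      rw [List.drop_eq_getElem_cons (by omega : a + 1 < xs.length)]
      rw [List.drop_eq_getElem_cons (by omega : a + 2 < xs.length)]
      rw [List.getD_eq_getElem _ _ (by omega : a < xs.length),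
        List.getD_eq_getElem _ _ (by omega : a + 1 < xs.length),
        List.getD_eq_getElem _ _ (by omega : a + 2 < xs.length)]
      simp only [List.take_succ_cons, List.take_zero]
    have hwmem : [xs.getD a 0, xs.getD (a + 1) 0, xs.getD (a + 2) 0] ∈ aSublists xs := by
      rw [mem_aSublists]
      exact ⟨(a : Int), (a : Int) + 3, by omega, by omega, by push_cast; omega,
        hslice.symm, by simp, by simp⟩
    refine List.mem_map.mpr ⟨[xs.getD a 0, xs.getD (a + 1) 0, xs.getD (a + 2) 0], ?_, ?_⟩
    · exact (PySem.Set.mem_ofList _ _).mpr hwmem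
    · exact aMedian_triple _ _ _
  have hdom : ∀ v ∈ (PySem.Set.ofList (aSublists xs)).map aMedian,
      ∃ b ∈ bMeds xs, b ≤ v := by
    intro v hv
    obtain ⟨w, hwmem, rfl⟩ := List.mem_map.mp hv
    obtain ⟨i, j, hi0, hij, hjL, hw, hwl, hwodd⟩ :=
      mem_aSublists.mp ((PySem.Set.mem_ofList _ _).mp hwmem)
    obtain ⟨t, ht, hle⟩ := exists_med3_le_median w hwl hwodd
    have hwdt : w = List.take (j.toNat - i.toNat) (List.drop i.toNat xs) := by
      rw [hw]
      exact PySem.List.slice_toNat xs hi0 (by omega)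
    have hgd : ∀ o : Nat, o < w.length →
        w.getD o 0 = xs.getD (i.toNat + o) 0 ∧ i.toNat + o < xs.length := by
      intro o ho
      have hlen' : w.length = min (j.toNat - i.toNat) (xs.length - i.toNat) := by
        rw [hwdt]; simp [List.length_take, List.length_drop]
      have hoxs : i.toNat + o < xs.length := by omega
      refine ⟨?_, hoxs⟩
      rw [hwdt] at ho ⊢
      rw [List.getD_eq_getElem _ _ ho, List.getD_eq_getElem _ _ hoxs]
      rw [List.getElem_take, List.getElem_drop]
    obtain ⟨hg0, hb0⟩ := hgd t (by omega)
    obtain ⟨hg1, _⟩ := hgd (t + 1) (by omega)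
    obtain ⟨hg2, hb2⟩ := hgd (t + 2) (by omega)
    refine ⟨med3 (xs.getD (i.toNat + t) 0) (xs.getD (i.toNat + t + 1) 0)
      (xs.getD (i.toNat + t + 2) 0), ?_, ?_⟩
    · rw [mem_bMeds]
      exact ⟨i.toNat + t, by omega, rfl⟩
    · rw [← hg0, show i.toNat + t + 1 = i.toNat + (t + 1) from by omega, ← hg1,
        show i.toNat + t + 2 = i.toNat + (t + 2) from by omega, ← hg2]
      exact hle
  have hmin : PySem.List.min? ((PySem.Set.ofList (aSublists xs)).map aMedian) (fun v => v) =
      PySem.List.min? (bMeds xs) (fun v => v) :=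
    min?_congr_sub _ _ hbne hsub hdom
  obtain ⟨m, hm⟩ : ∃ m, PySem.List.min? (bMeds xs) (fun v => v) = some m := by
    cases h : PySem.List.min? (bMeds xs) (fun v => v) with
    | none => exact absurd ((PySem.List.min?_eq_none_iff _ _).mp h) hbne
    | some m => exact ⟨m, rfl⟩
  have hmxs : m ∈ xs := by
    have hmmem := PySem.List.min?_mem hm
    obtain ⟨a, ha, hmv⟩ := mem_bMeds.mp hmmem
    have h0 : xs.getD a 0 ∈ xs := by
      rw [List.getD_eq_getElem _ _ (by omega : a < xs.length)]; exact List.getElem_mem _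
    have h1 : xs.getD (a + 1) 0 ∈ xs := by
      rw [List.getD_eq_getElem _ _ (by omega : a + 1 < xs.length)]; exact List.getElem_mem _
    have h2' : xs.getD (a + 2) 0 ∈ xs := by
      rw [List.getD_eq_getElem _ _ (by omega : a + 2 < xs.length)]; exact List.getElem_mem _
    rcases med3_mem (xs.getD a 0) (xs.getD (a + 1) 0) (xs.getD (a + 2) 0) with h | h | h <;>
      rw [hmv, h] <;> assumption
  have hbr : bRound xs = some (xs.erase m) := by
    unfold bRound
    rw [hm]
    exact PySem.List.remove?_eq_some_erase xs m hmxs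
  refine ⟨?_, xs.erase m, hbr, ?_⟩
  · unfold aRound bRound
    show (match PySem.List.min? (List.map aMedian (PySem.Set.ofList (aSublists xs))) (fun v => v) with
        | none => none
        | some m => PySem.List.remove? xs m) =
        (match PySem.List.min? (bMeds xs) (fun v => v) with
        | none => none
        | some m => PySem.List.remove? xs m)
    rw [hmin]
  · rw [List.length_erase_of_mem hmxs]; omega

theorem loopAB_eq : ∀ (fuel : Nat) (xs : List Int), fuel + 2 ≤ xs.length →
    aLoop xs fuel = bLoop xs fuel := by
  intro fuel
  induction fuel with
  | zero => intro xs _; rfl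
  | succ n ih =>
    intro xs hlen
    obtain ⟨hr, ys, hby, hys⟩ := roundAB_eq xs (by omega)
    simp only [aLoop, bLoop]
    rw [hr, hby]
    exact ih ys (by omega)

-- ===== VERDICT (by name: the statement is the Claim_ definition above) =====
theorem medianGame_spec : Claim_equal_medianGame := by
  intro arr N _ hpre
  unfold Spec_medianGame medianGame medianGame_alt
  rcases Nat.eq_zero_or_pos (N - 2).toNat with h0 | hpos
  · rw [h0]; rfl
  · have hlen : (N - 2).toNat + 2 ≤ arr.length := by
      rcases hpre with h | h
      · omega
      · omega
    rw [loopAB_eq _ _ hlen]
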